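-- pv_equiv track=rewrite | github.com/jj55222/FlameOn | pipeline2_discovery/casegraph/calibration_profile.py | _primary_role
-- ===== SOURCE A (Python) =====
-- from typing import Any, Dict, Iterable, List, Mapping, Optional, Sequence, Tuple
--
-- def _primary_role(roles: Sequence[str]) -> str:
--     for role in (
--         "tier_a_primary_media_case",
--         "media_artifact_case",
--         "document_artifact_case",
--         "negative_or_no_artifact_case",
--         "outcome_case",
--         "identity_case",
--     ):
--         if role in roles:
--             return role
--     return "identity_case"
-- ===== SOURCE B (Python) =====
-- ORDER = [
--     "tier_a_primary_media_case",
--     "media_artifact_case",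
--     "document_artifact_case",
--     "negative_or_no_artifact_case",
--     "outcome_case",
--     "identity_case",
-- ]
-- _RANK = {name: i for i, name in enumerate(ORDER)}
--
--
-- def _primary_role(roles):
--     best = 6  # sentinel: no known role seen yet
--     for r in roles:
--         best = min(best, _RANK.get(r, 6))
--     return ORDER[best] if best < 6 else "identity_case"
-- ===== Notes on version B (the rewrite author's own statement) =====
-- stated objective: alternative
-- what changed: Instead of scanning the input up to six times (one membership test per priority name), B makes a single pass over the input, tracking the minimum priority rank via a precomputed rank dict, and returns the name of that rank (or 'identity_case' if none matched).
import Mathlib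
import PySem

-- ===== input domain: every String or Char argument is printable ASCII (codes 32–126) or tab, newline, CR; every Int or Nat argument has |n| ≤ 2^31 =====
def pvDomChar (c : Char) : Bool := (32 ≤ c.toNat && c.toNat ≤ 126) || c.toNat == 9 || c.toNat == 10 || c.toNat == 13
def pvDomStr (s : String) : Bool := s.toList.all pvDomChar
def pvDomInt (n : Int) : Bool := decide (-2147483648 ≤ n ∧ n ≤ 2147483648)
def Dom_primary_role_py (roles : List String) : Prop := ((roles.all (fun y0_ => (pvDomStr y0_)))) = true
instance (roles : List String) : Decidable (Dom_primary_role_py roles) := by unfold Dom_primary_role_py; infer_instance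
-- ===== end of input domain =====

-- B scans the input once, tracking the minimum priority rank, instead of A's
-- up-to-six membership scans of the input (objective: alternative decomposition).

-- ===== PORT A =====
-- A's for-loop over the fixed priority tuple: return the first name present in `roles`.
def pvFirstPresent (ps : List String) (roles : List String) : String :=
  match ps with
  | [] => "identity_case"
  | p :: ps' => if roles.contains p then p else pvFirstPresent ps' roles

def primary_role_py (roles : List String) : String :=
  pvFirstPresent
    [ "tier_a_primary_media_case",
      "media_artifact_case",
      "document_artifact_case",
      "negative_or_no_artifact_case",
      "outcome_case",
      "identity_case" ]
    roles

-- ===== PORT B =====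
-- _RANK.get(r, 6)
def pvRank (r : String) : Int :=
  if r = "tier_a_primary_media_case" then 0
  else if r = "media_artifact_case" then 1
  else if r = "document_artifact_case" then 2
  else if r = "negative_or_no_artifact_case" then 3
  else if r = "outcome_case" then 4
  else if r = "identity_case" then 5
  else 6

-- ORDER[i] for i in [0,6) (the only indices B ever uses)
def pvOrderAt (i : Int) : String :=
  if i = 0 then "tier_a_primary_media_case"
  else if i = 1 then "media_artifact_case"
  else if i = 2 then "document_artifact_case"
  else if i = 3 then "negative_or_no_artifact_case"
  else if i = 4 then "outcome_case"
  else "identity_case"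

def primary_role_py_alt (roles : List String) : String :=
  let best := roles.foldl (fun b r => min b (pvRank r)) 6
  if best < 6 then pvOrderAt best else "identity_case"

-- ===== PRECONDITION & SPEC =====
def Spec_primary_role_py (roles : List String) (out : String) : Prop := out = primary_role_py_alt roles
instance (roles : List String) (out : String) : Decidable (Spec_primary_role_py roles out) := by unfold Spec_primary_role_py; infer_instance

-- ===== CLAIM (what is proved, stated in full; the proofs are below) =====
def Claim_equal_primary_role_py : Prop := ∀ (roles : List String), Dom_primary_role_py roles → Spec_primary_role_py roles (primary_role_py roles)

-- ===== LEMMAS AND PROOFS =====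

-- the fold B performs, as a proof-side abbreviation
def pvG (roles : List String) : Int :=
  roles.foldl (fun b r => min b (pvRank r)) 6

theorem pvFold_min (roles : List String) :
    ∀ b c : Int, roles.foldl (fun b r => min b (pvRank r)) (min b c)
      = min b (roles.foldl (fun b r => min b (pvRank r)) c) := by
  induction roles with
  | nil => intro b c; simp
  | cons r rs ih =>
    intro b c
    simp only [List.foldl_cons]
    rw [min_assoc, ih]

theorem pvG_cons (r : String) (rs : List String) :
    pvG (r :: rs) = min (pvRank r) (pvG rs) := by
  unfold pvG
  simp only [List.foldl_cons]
  rw [min_comm 6 (pvRank r), pvFold_min]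

theorem pvRank_bounds (r : String) : 0 ≤ pvRank r ∧ pvRank r ≤ 6 := by
  unfold pvRank; split_ifs <;> norm_num

theorem pvG_bounds (roles : List String) : 0 ≤ pvG roles ∧ pvG roles ≤ 6 := by
  induction roles with
  | nil => unfold pvG; norm_num
  | cons r rs ih =>
    rw [pvG_cons]
    have := pvRank_bounds r
    constructor
    · exact le_min this.1 ih.1
    · exact le_trans (min_le_right _ _) ih.2

theorem pvG_le (roles : List String) (r : String) (h : r ∈ roles) :
    pvG roles ≤ pvRank r := by
  induction roles with
  | nil => cases h
  | cons x xs ih =>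
    rw [pvG_cons]
    rcases List.mem_cons.mp h with h | h
    · subst h; exact min_le_left _ _
    · exact le_trans (min_le_right _ _) (ih h)

theorem pvG_attained (roles : List String) :
    pvG roles = 6 ∨ ∃ r ∈ roles, pvRank r = pvG roles := by
  induction roles with
  | nil => left; rfl
  | cons x xs ih =>
    rw [pvG_cons]
    rcases le_total (pvRank x) (pvG xs) with h | h
    · right; exact ⟨x, List.mem_cons_self, (min_eq_left h).symm⟩
    · rw [min_eq_right h]
      rcases ih with h6 | ⟨r, hr, hrk⟩
      · left; exact h6
      · right; exact ⟨r, List.mem_cons_of_mem _ hr, hrk⟩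

-- a string of rank k < 6 is the k-th priority name
theorem pvRank_inj (r : String) (h : pvRank r < 6) : r = pvOrderAt (pvRank r) := by
  unfold pvRank at *
  split_ifs at * with h0 h1 h2 h3 h4 h5 <;> simp_all [pvOrderAt]

-- ===== VERDICT (by name: the statement is the Claim_ definition above) =====
theorem primary_role_py_spec : Claim_equal_primary_role_py := by
  intro roles _
  unfold Spec_primary_role_py primary_role_py primary_role_py_alt
  have hb := pvG_bounds roles
  show _ = (if pvG roles < 6 then pvOrderAt (pvG roles) else "identity_case")
  have notmem : ∀ k : Int, pvG roles = k → k < 6 → pvOrderAt k ∈ roles := by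
    intro k hk hlt
    rcases pvG_attained roles with h6 | ⟨r, hr, hrk⟩
    · omega
    · have : r = pvOrderAt k := by rw [← hk, ← hrk]; exact pvRank_inj r (by omega)
      exact this ▸ hr
  by_cases h0 : ("tier_a_primary_media_case" : String) ∈ roles
  · have hle := pvG_le roles _ h0
    have hv : pvG roles = 0 := by
      have : pvRank "tier_a_primary_media_case" = 0 := by decide
      omega
    simp [pvFirstPresent, h0, hv, pvOrderAt]
  · have hne0 : pvG roles ≠ 0 := fun h => by
      have := notmem 0 h (by norm_num); simp [pvOrderAt] at this
      exact h0 this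
    by_cases h1 : ("media_artifact_case" : String) ∈ roles
    · have hle := pvG_le roles _ h1
      have hv : pvG roles = 1 := by
        have : pvRank "media_artifact_case" = 1 := by decide
        omega
      simp [pvFirstPresent, h0, h1, hv, pvOrderAt]
    · have hne1 : pvG roles ≠ 1 := fun h => by
        have := notmem 1 h (by norm_num); simp [pvOrderAt] at this
        exact h1 this
      by_cases h2 : ("document_artifact_case" : String) ∈ roles
      · have hle := pvG_le roles _ h2
        have hv : pvG roles = 2 := by
          have : pvRank "document_artifact_case" = 2 := by decide
          omega
        simp [pvFirstPresent, h0, h1, h2, hv, pvOrderAt]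
      · have hne2 : pvG roles ≠ 2 := fun h => by
          have := notmem 2 h (by norm_num); simp [pvOrderAt] at this
          exact h2 this
        by_cases h3 : ("negative_or_no_artifact_case" : String) ∈ roles
        · have hle := pvG_le roles _ h3
          have hv : pvG roles = 3 := by
            have : pvRank "negative_or_no_artifact_case" = 3 := by decide
            omega
          simp [pvFirstPresent, h0, h1, h2, h3, hv, pvOrderAt]
        · have hne3 : pvG roles ≠ 3 := fun h => by
            have := notmem 3 h (by norm_num); simp [pvOrderAt] at this
            exact h3 this
          by_cases h4 : ("outcome_case" : String) ∈ roles
          · have hle := pvG_le roles _ h4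
            have hv : pvG roles = 4 := by
              have : pvRank "outcome_case" = 4 := by decide
              omega
            simp [pvFirstPresent, h0, h1, h2, h3, h4, hv, pvOrderAt]
          · have hne4 : pvG roles ≠ 4 := fun h => by
              have := notmem 4 h (by norm_num); simp [pvOrderAt] at this
              exact h4 this
            by_cases h5 : ("identity_case" : String) ∈ roles
            · have hle := pvG_le roles _ h5
              have hv : pvG roles = 5 := by
                have : pvRank "identity_case" = 5 := by decide
                omega
              simp [pvFirstPresent, h0, h1, h2, h3, h4, h5, hv, pvOrderAt]
            · have hne5 : pvG roles ≠ 5 := fun h => by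
                have := notmem 5 h (by norm_num); simp [pvOrderAt] at this
                exact h5 this
              have hv : pvG roles = 6 := by omega
              simp [pvFirstPresent, h0, h1, h2, h3, h4, h5, hv]
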